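-- pv_equiv track=rewrite | github.com/jessekim-ck/algorithms | mayi_baekjoon/week1/1018_chessboard.py | get_min_error
-- ===== SOURCE A (Python) =====
-- def get_min_error(input_list, n):
--     integral_img = [[0]*(n + 1)]
--     min_error = 64
--     b_or_w = ["B", "W"]
--     for i, row in enumerate(input_list):
--         tmp = 0
--         integral = [0]
--         for j, col in enumerate(row):
--             v = (col == b_or_w[(i + j) % 2])
--             tmp += integral_img[i][j + 1] + v - integral_img[i][j]
--             integral.append(tmp)
--             if i < 7 or j < 7:
--                 pass
--             else:
--                 error = (tmp +
--                         integral_img[i - 7][j - 7] -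
--                         integral[j - 7] -
--                         integral_img[i - 7][j + 1])
--                 min_error = min(error, 64 - error, min_error)
--         integral_img.append(integral)
--     return min_error
-- ===== SOURCE B (Python) =====
-- def get_min_error(input_list, n):
--     min_error = 64
--     for i in range(7, len(input_list)):
--         for j in range(7, len(input_list[i])):
--             error = 0
--             for di in range(8):
--                 for dj in range(8):
--                     error += (input_list[i - 7 + di][j - 7 + dj]
--                               == ["B", "W"][(i + j + di + dj) % 2])
--             min_error = min(error, 64 - error, min_error)
--     return min_error
-- ===== Notes on version B (the rewrite author's own statement) =====
-- stated objective: simpler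
-- what changed: B drops A's incremental integral-image bookkeeping and instead, for each 8x8 window top-left, directly counts matches to the global chessboard pattern with a plain double loop.
import Mathlib
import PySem

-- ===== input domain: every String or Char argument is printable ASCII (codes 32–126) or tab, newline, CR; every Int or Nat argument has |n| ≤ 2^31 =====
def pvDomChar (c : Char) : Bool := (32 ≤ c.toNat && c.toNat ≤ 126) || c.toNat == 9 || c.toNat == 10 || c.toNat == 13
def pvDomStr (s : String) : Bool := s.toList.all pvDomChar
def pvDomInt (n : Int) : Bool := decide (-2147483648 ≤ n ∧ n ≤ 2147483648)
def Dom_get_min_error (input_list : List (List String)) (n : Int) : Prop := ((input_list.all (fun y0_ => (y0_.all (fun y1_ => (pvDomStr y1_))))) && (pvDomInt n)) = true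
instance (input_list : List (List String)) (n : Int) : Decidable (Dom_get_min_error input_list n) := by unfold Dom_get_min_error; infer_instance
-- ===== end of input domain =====

-- B replaces A's incremental integral-image bookkeeping by a direct per-window count of
-- matches against the global chessboard pattern (objective: simpler; not faster).

-- ===== PORT A =====
-- inner loop of A: `for j, col in enumerate(row)`; state (tmp, integral, min_error), index j
-- carried explicitly.  All Python list indices here are nonnegative and, on every input
-- admitted by Pre_, in range (out of range Python raises IndexError, which Pre_ excludes),
-- so `getD _ 0` / `getD _ []` is exact on that domain.
def innerA (i : Nat) (img : List (List Int)) : List String → Nat → Int → List Int → Int → (Int × List Int × Int)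
  | [], _, tmp, integral, me => (tmp, integral, me)
  | col :: rest, j, tmp, integral, me =>
      let v : Int := if col = ["B", "W"].getD ((i + j) % 2) "" then 1 else 0
      let tmp' := tmp + ((img.getD i []).getD (j + 1) 0 + v - (img.getD i []).getD j 0)
      let integral' := integral ++ [tmp']
      let me' := if i < 7 ∨ j < 7 then me
        else
          let error := tmp' + (img.getD (i - 7) []).getD (j - 7) 0 -
            integral'.getD (j - 7) 0 - (img.getD (i - 7) []).getD (j + 1) 0
          min (min error (64 - error)) me
      innerA i img rest (j + 1) tmp' integral' me'

-- outer loop of A: `for i, row in enumerate(input_list)`; state (integral_img, min_error)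
def outerA : List (List String) → Nat → List (List Int) → Int → Int
  | [], _, _, me => me
  | row :: rest, i, img, me =>
      let r := innerA i img row 0 0 [0] me
      outerA rest (i + 1) (img ++ [r.2.1]) r.2.2

def get_min_error (input_list : List (List String)) (n : Int) : Int :=
  outerA input_list 0 [List.replicate (n + 1).toNat 0] 64

-- ===== PORT B =====
-- `for i in range(7, len(input_list))`, `for j in range(7, len(input_list[i]))`, then a direct
-- 8×8 count; indexing is in range on Pre_ as above, so `getD` is exact there.
def get_min_error_alt (input_list : List (List String)) (n : Int) : Int :=
  (List.range' 7 (input_list.length - 7)).foldl (fun me i =>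
    (List.range' 7 ((input_list.getD i []).length - 7)).foldl (fun me j =>
      let error := (List.range 8).foldl (fun e di =>
        (List.range 8).foldl (fun e dj =>
          e + (if (input_list.getD (i - 7 + di) []).getD (j - 7 + dj) "" =
                  ["B", "W"].getD ((i + j + di + dj) % 2) "" then 1 else 0)) e) 0
      min (min error (64 - error)) me) me) 64

-- ===== PRECONDITION & SPEC =====
-- Pre_ excludes exactly the inputs on which A raises IndexError: a row longer than some earlier
-- row, or a nonempty first row longer than n (the integral image is then indexed out of range).
def Pre_get_min_error (input_list : List (List String)) (n : Int) : Prop :=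
  input_list.Pairwise (fun a b => b.length ≤ a.length) ∧
  ((input_list.headD []).length : Int) ≤ max n 0

instance (input_list : List (List String)) (n : Int) : Decidable (Pre_get_min_error input_list n) := by
  unfold Pre_get_min_error; infer_instance

def pvWitness_get_min_error : List (List String) × Int := ([["B", "W"], ["W"]], 3)

def Spec_get_min_error (input_list : List (List String)) (n : Int) (out : Int) : Prop := out = get_min_error_alt input_list n
instance (input_list : List (List String)) (n : Int) (out : Int) : Decidable (Spec_get_min_error input_list n out) := by unfold Spec_get_min_error; infer_instance

-- ===== CLAIM (what is proved, stated in full; the proofs are below) =====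
def Claim_equal_get_min_error : Prop := ∀ (input_list : List (List String)) (n : Int), Dom_get_min_error input_list n → Pre_get_min_error input_list n → Spec_get_min_error input_list n (get_min_error input_list n)

-- ===== LEMMAS AND PROOFS =====

-- the global chessboard pattern and the 0/1 match value of a cell (0 outside the board)
def pvPat (i j : Nat) : String := if (i + j) % 2 = 0 then "B" else "W"
def pvVal (L : List (List String)) (i j : Nat) : Int :=
  if (L.getD i []).getD j "" = pvPat i j then 1 else 0
-- 2-D prefix sum of match values
def pvI (L : List (List String)) (a b : Nat) : Int :=
  ∑ r ∈ Finset.range a, ∑ c ∈ Finset.range b, pvVal L r c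
-- match count of the 8×8 window whose bottom-right cell is (i, j)
def pvWin (L : List (List String)) (i j : Nat) : Int :=
  ∑ di ∈ Finset.range 8, ∑ dj ∈ Finset.range 8, pvVal L (i - 7 + di) (j - 7 + dj)
def pvStep (L : List (List String)) (i : Nat) (m : Int) (j : Nat) : Int :=
  min (min (pvWin L i j) (64 - pvWin L i j)) m
-- window columns of row i still to be processed when the inner loop is at column j0
def pvRowWins (i j0 len : Nat) : List Nat :=
  if 7 ≤ i then (List.range' j0 (len - j0)).filter (fun j => 7 ≤ j) else []
-- the reference integral image after i rows have been processed
def pvImg (L : List (List String)) (n : Int) (i : Nat) : List (List Int) :=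
  List.replicate (n + 1).toNat 0 ::
    (List.range i).map (fun k => (List.range ((L.getD k []).length + 1)).map (pvI L (k + 1)))

lemma pvPat_getD (i j : Nat) : ["B", "W"].getD ((i + j) % 2) "" = pvPat i j := by
  rcases Nat.mod_two_eq_zero_or_one (i + j) with h | h <;> simp [pvPat, h]

lemma pvI_succ_row (L : List (List String)) (a b : Nat) :
    pvI L (a + 1) b = pvI L a b + ∑ c ∈ Finset.range b, pvVal L a c := by
  simp [pvI, Finset.sum_range_succ]

lemma pvI_col_zero (L : List (List String)) (a : Nat) : pvI L a 0 = 0 := by simp [pvI]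

lemma sum_map_range (f : Nat → Int) (n : Nat) :
    ((List.range n).map f).sum = ∑ i ∈ Finset.range n, f i := by
  induction n with
  | zero => simp
  | succ n ih =>
    rw [List.range_succ, List.map_append, List.sum_append, Finset.sum_range_succ, ih]; simp

-- inclusion–exclusion on the 2-D prefix sums gives the 8×8 window count
lemma pvWin_eq (L : List (List String)) (i j : Nat) (hi : 7 ≤ i) (hj : 7 ≤ j) :
    pvI L (i + 1) (j + 1) + pvI L (i - 7) (j - 7) - pvI L (i + 1) (j - 7) - pvI L (i - 7) (j + 1)
      = pvWin L i j := by
  have hcol : ∀ r, ∑ c ∈ Finset.range (j + 1), pvVal L r c - ∑ c ∈ Finset.range (j - 7), pvVal L r c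
      = ∑ dj ∈ Finset.range 8, pvVal L r (j - 7 + dj) := by
    intro r
    rw [← Finset.sum_Ico_eq_sub _ (by omega), Finset.sum_Ico_eq_sum_range]
    have : j + 1 - (j - 7) = 8 := by omega
    rw [this]
  have hrow : pvI L (i + 1) (j + 1) - pvI L (i + 1) (j - 7)
      - (pvI L (i - 7) (j + 1) - pvI L (i - 7) (j - 7))
      = ∑ di ∈ Finset.range 8, ∑ dj ∈ Finset.range 8, pvVal L (i - 7 + di) (j - 7 + dj) := by
    unfold pvI
    rw [← Finset.sum_sub_distrib, ← Finset.sum_sub_distrib]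
    calc ∑ r ∈ Finset.range (i+1), (∑ c ∈ Finset.range (j+1), pvVal L r c - ∑ c ∈ Finset.range (j-7), pvVal L r c)
          - ∑ r ∈ Finset.range (i-7), (∑ c ∈ Finset.range (j+1), pvVal L r c - ∑ c ∈ Finset.range (j-7), pvVal L r c)
        = ∑ r ∈ Finset.Ico (i-7) (i+1), (∑ c ∈ Finset.range (j+1), pvVal L r c - ∑ c ∈ Finset.range (j-7), pvVal L r c) := by
          rw [Finset.sum_Ico_eq_sub _ (by omega)]
      _ = ∑ di ∈ Finset.range 8, ∑ dj ∈ Finset.range 8, pvVal L (i - 7 + di) (j - 7 + dj) := by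
          rw [Finset.sum_Ico_eq_sum_range]
          have h8 : i + 1 - (i - 7) = 8 := by omega
          rw [h8]
          exact Finset.sum_congr rfl (fun di _ => hcol _)
  unfold pvWin
  linarith [hrow]

-- the inner-loop invariant: tmp is a 2-D prefix sum, integral the prefix-sum row, and
-- min_error folds pvStep over the window columns already passed
lemma innerA_spec (L : List (List String)) (i : Nat) (img : List (List Int))
    (Hp : ∀ c, c ≤ (L.getD i []).length → (img.getD i []).getD c 0 = pvI L i c)
    (Hp7 : ∀ c, c ≤ (L.getD i []).length → (img.getD (i - 7) []).getD c 0 = pvI L (i - 7) c) :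
    ∀ (d j0 : Nat) (me : Int), (L.getD i []).length - j0 = d → j0 ≤ (L.getD i []).length →
    innerA i img ((L.getD i []).drop j0) j0 (pvI L (i + 1) j0)
        ((List.range (j0 + 1)).map (pvI L (i + 1))) me
      = (pvI L (i + 1) (L.getD i []).length,
         (List.range ((L.getD i []).length + 1)).map (pvI L (i + 1)),
         (pvRowWins i j0 (L.getD i []).length).foldl (pvStep L i) me) := by
  intro d
  induction d with
  | zero =>
    intro j0 me hd hle
    have hj0 : j0 = (L.getD i []).length := by omega
    subst hj0
    rw [List.drop_length]
    simp [innerA, pvRowWins]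
  | succ d ih =>
    intro j0 me hd hle
    have hlt : j0 < (L.getD i []).length := by omega
    rw [List.drop_eq_getElem_cons hlt]
    have hv : (if (L.getD i [])[j0] = ["B", "W"].getD ((i + j0) % 2) "" then (1:Int) else 0)
        = pvVal L i j0 := by
      rw [pvPat_getD]
      unfold pvVal
      rw [List.getD_eq_getElem _ _ hlt]
    have htmp : pvI L (i + 1) j0 + ((img.getD i []).getD (j0 + 1) 0 +
        (if (L.getD i [])[j0] = ["B", "W"].getD ((i + j0) % 2) "" then (1:Int) else 0) -
        (img.getD i []).getD j0 0) = pvI L (i + 1) (j0 + 1) := by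
      rw [hv, Hp _ (by omega), Hp _ (by omega), pvI_succ_row, pvI_succ_row,
        Finset.sum_range_succ]
      ring
    have hint : (List.range (j0 + 1)).map (pvI L (i + 1)) ++ [pvI L (i + 1) (j0 + 1)]
        = (List.range (j0 + 1 + 1)).map (pvI L (i + 1)) := by
      simp [List.range_succ]
    show innerA i img _ _ _ _ _ = _
    rw [innerA]
    simp only []
    rw [htmp, hint]
    by_cases hcase : i < 7 ∨ j0 < 7
    · rw [if_pos hcase]
      rw [ih (j0 + 1) me (by omega) (by omega)]
      congr 2
      unfold pvRowWins
      by_cases hi : 7 ≤ i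
      · rw [if_pos hi, if_pos hi]
        have : (L.getD i []).length - j0 = ((L.getD i []).length - (j0+1)) + 1 := by omega
        rw [this, List.range'_succ, List.filter_cons]
        have h7 : ¬ (7 ≤ j0) := by omega
        simp only [h7, decide_false, Bool.false_eq_true, if_false]
      · simp [hi]
    · rw [if_neg hcase]
      have hi7 : 7 ≤ i := by omega
      have hj7 : 7 ≤ j0 := by omega
      have herr : pvI L (i + 1) (j0 + 1) + (img.getD (i - 7) []).getD (j0 - 7) 0 -
          ((List.range (j0 + 1 + 1)).map (pvI L (i + 1))).getD (j0 - 7) 0 -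
          (img.getD (i - 7) []).getD (j0 + 1) 0 = pvWin L i j0 := by
        rw [Hp7 _ (by omega), Hp7 _ (by omega),
          PySem.List.getD_map_range _ _ _ _ (by omega)]
        rw [← pvWin_eq L i j0 hi7 hj7]
      rw [herr]
      rw [ih (j0 + 1) _ (by omega) (by omega)]
      congr 1
      unfold pvRowWins
      rw [if_pos hi7, if_pos hi7]
      have h1 : (L.getD i []).length - j0 = ((L.getD i []).length - (j0+1)) + 1 := by omega
      rw [h1, List.range'_succ, List.filter_cons]
      simp only [hj7, decide_true, if_pos]
      rw [List.foldl_cons]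
      rfl

lemma pvImg_getD (L : List (List String)) (n : Int)
    (hmono : ∀ k i : Nat, k ≤ i → (L.getD i []).length ≤ (L.getD k []).length)
    (i k c : Nat) (hk : k ≤ i) (hc : c ≤ (L.getD i []).length) :
    ((pvImg L n i).getD k []).getD c 0 = pvI L k c := by
  match k with
  | 0 =>
    have h0 : (pvImg L n i).getD 0 [] = List.replicate (n + 1).toNat 0 := rfl
    rw [h0]
    have hz : (List.replicate (n + 1).toNat (0:Int)).getD c 0 = 0 := by
      by_cases h : c < (n + 1).toNat
      · exact List.getD_replicate _ h
      · exact List.getD_eq_default _ _ (by simpa using Nat.le_of_not_lt h)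
    rw [hz]; simp [pvI]
  | k' + 1 =>
    have h1 : (pvImg L n i).getD (k' + 1) []
        = ((List.range i).map (fun k => (List.range ((L.getD k []).length + 1)).map (pvI L (k + 1)))).getD k' [] := rfl
    rw [h1, PySem.List.getD_map_range _ _ _ _ (by omega)]
    have hlen : c < (L.getD k' []).length + 1 := by
      have := hmono k' i (by omega); omega
    rw [PySem.List.getD_map_range _ _ _ _ hlen]

-- the outer-loop invariant: A folds pvStep over the window columns of each remaining row
lemma outerA_spec (L : List (List String)) (n : Int)
    (hmono : ∀ k i : Nat, k ≤ i → (L.getD i []).length ≤ (L.getD k []).length) :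
    ∀ (rest : List (List String)) (i : Nat) (me : Int), rest = L.drop i →
    outerA rest i (pvImg L n i) me
      = ((List.range' i (L.length - i)).foldl
          (fun m r => (pvRowWins r 0 (L.getD r []).length).foldl (pvStep L r) m) me) := by
  intro rest
  induction rest with
  | nil =>
    intro i me h
    have : L.length ≤ i := List.drop_eq_nil_iff.mp h.symm
    have h0 : L.length - i = 0 := by omega
    rw [h0]
    rfl
  | cons row rest' ih =>
    intro i me h
    have hi : i < L.length := by
      by_contra hcon
      have : L.drop i = [] := List.drop_eq_nil_iff.mpr (by omega)
      rw [this] at h; simp at h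
    have hdrop : L.drop i = L[i] :: L.drop (i + 1) := List.drop_eq_getElem_cons hi
    rw [hdrop] at h
    obtain ⟨hrow, hrest⟩ : row = L[i] ∧ rest' = L.drop (i + 1) :=
      ⟨(List.cons.injEq _ _ _ _ ▸ h).1, (List.cons.injEq _ _ _ _ ▸ h).2⟩
    have hrow' : row = L.getD i [] := by rw [hrow, List.getD_eq_getElem _ _ hi]
    show outerA (row :: rest') i (pvImg L n i) me = _
    rw [outerA]
    have Hp : ∀ c, c ≤ (L.getD i []).length → ((pvImg L n i).getD i []).getD c 0 = pvI L i c :=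
      fun c hc => pvImg_getD L n hmono i i c (le_refl i) hc
    have Hp7 : ∀ c, c ≤ (L.getD i []).length → ((pvImg L n i).getD (i - 7) []).getD c 0 = pvI L (i - 7) c :=
      fun c hc => pvImg_getD L n hmono i (i - 7) c (by omega) hc
    have hinner := innerA_spec L i (pvImg L n i) Hp Hp7 (L.getD i []).length 0 me rfl (by omega)
    rw [List.drop_zero] at hinner
    have h0 : pvI L (i + 1) 0 = 0 := pvI_col_zero L (i + 1)
    have hint0 : (List.range (0 + 1)).map (pvI L (i + 1)) = [pvI L (i + 1) 0] := rfl
    rw [hrow']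
    have hstep : innerA i (pvImg L n i) (L.getD i []) 0 0 [0] me
        = (pvI L (i + 1) (L.getD i []).length,
           (List.range ((L.getD i []).length + 1)).map (pvI L (i + 1)),
           (pvRowWins i 0 (L.getD i []).length).foldl (pvStep L i) me) := by
      have hz : ([0] : List Int) = (List.range (0 + 1)).map (pvI L (i + 1)) := by
        rw [hint0, h0]
      rw [hz, ← h0] at *
      exact hinner
    rw [hstep]
    have himg : pvImg L n i ++ [(List.range ((L.getD i []).length + 1)).map (pvI L (i + 1))]
        = pvImg L n (i + 1) := by
      unfold pvImg
      conv_rhs => rw [List.range_succ, List.map_append]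
      rfl
    have hrange : List.range' i (L.length - i) = i :: List.range' (i + 1) (L.length - (i + 1)) := by
      have : L.length - i = (L.length - (i + 1)) + 1 := by omega
      rw [this, List.range'_succ]
    show outerA rest' (i + 1) _ _ = _
    rw [himg, ih (i + 1) _ hrest, hrange, List.foldl_cons]

lemma pvFilter (m : Nat) :
    (List.range' 0 m).filter (fun j => decide (7 ≤ j)) = List.range' 7 (m - 7) := by
  induction m with
  | zero => rfl
  | succ m ih =>
    rw [List.range'_1_concat, List.filter_append, ih]
    by_cases h : 7 ≤ m
    · have h1 : m + 1 - 7 = (m - 7) + 1 := by omega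
      have h2 : (List.filter (fun j => decide (7 ≤ j)) [0 + m]) = [m] := by simp [h]
      rw [h1, h2, List.range'_1_concat]
      have : 7 + (m - 7) = m := by omega
      rw [this]
    · have h1 : m + 1 - 7 = 0 := by omega
      have h2 : m - 7 = 0 := by omega
      have h3 : (List.filter (fun j => decide (7 ≤ j)) [0 + m]) = [] := by simp; omega
      rw [h1, h2, h3]
      simp

-- B computes the same fold over the same windows in the same order
lemma altB_spec (L : List (List String)) (n : Int) :
    get_min_error_alt L n
      = ((List.range' 0 L.length).foldl
          (fun m r => (pvRowWins r 0 (L.getD r []).length).foldl (pvStep L r) m) 64) := by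
  unfold get_min_error_alt
  have hsplit : List.range' 0 L.length
      = List.range' 0 (min 7 L.length) ++ List.range' (min 7 L.length) (L.length - 7) := by
    have h := List.range'_append (s := 0) (m := min 7 L.length) (n := L.length - 7) (step := 1)
    rw [Nat.one_mul, Nat.zero_add] at h
    rw [h]
    congr 1
    omega
  rw [hsplit, List.foldl_append]
  -- rows below 7 contribute nothing
  have hlow : List.foldl (fun m r => (pvRowWins r 0 (L.getD r []).length).foldl (pvStep L r) m) (64:Int)
      (List.range' 0 (min 7 L.length)) = 64 := by
    rw [PySem.List.foldl_congr_mem _ _ (fun m _ => m) 64 ?_, List.foldl_fixed]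
    intro acc x hx
    have : x < 7 := by
      have := List.mem_range'_1.mp hx
      omega
    unfold pvRowWins
    rw [if_neg (by omega)]
    rfl
  rw [hlow]
  have hsame : List.range' (min 7 L.length) (L.length - 7) = List.range' 7 (L.length - 7) := by
    by_cases h7 : 7 ≤ L.length
    · congr 1
      omega
    · have : L.length - 7 = 0 := by omega
      rw [this]
      rfl
  rw [hsame]
  -- row by row
  apply (PySem.List.foldl_congr_mem _ _ _ _ _).symm
  intro me r hr
  have hr7 : 7 ≤ r := (List.mem_range'_1.mp hr).1
  have hwins : pvRowWins r 0 (L.getD r []).length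
      = List.range' 7 ((L.getD r []).length - 7) := by
    unfold pvRowWins
    rw [if_pos hr7, Nat.sub_zero]
    exact pvFilter _
  rw [hwins]
  -- column by column
  apply PySem.List.foldl_congr_mem
  intro me' j hj
  have hj7 : 7 ≤ j := (List.mem_range'_1.mp hj).1
  -- the brute-force double loop computes the window match count
  have herr : (List.range 8).foldl (fun e di =>
      (List.range 8).foldl (fun e dj =>
        e + (if (L.getD (r - 7 + di) []).getD (j - 7 + dj) "" =
                ["B", "W"].getD ((r + j + di + dj) % 2) "" then 1 else 0)) e) 0
      = pvWin L r j := by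
    have hin : ∀ (e : Int) (di : Nat), (List.range 8).foldl (fun e dj =>
        e + (if (L.getD (r - 7 + di) []).getD (j - 7 + dj) "" =
                ["B", "W"].getD ((r + j + di + dj) % 2) "" then 1 else 0)) e
        = e + ∑ dj ∈ Finset.range 8, pvVal L (r - 7 + di) (j - 7 + dj) := by
      intro e di
      rw [PySem.List.foldl_add]
      congr 1
      rw [sum_map_range]
      apply Finset.sum_congr rfl
      intro dj _
      have hpar : (r + j + di + dj) % 2 = ((r - 7 + di) + (j - 7 + dj)) % 2 := by omega
      rw [hpar, pvPat_getD]
      rfl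
    simp only [hin]
    rw [PySem.List.foldl_add, sum_map_range]
    simp [pvWin]
  simp only [herr]
  rfl

-- Pre_'s Pairwise conjunct gives monotone row lengths, through getD
lemma pre_mono (L : List (List String))
    (h : L.Pairwise (fun a b => b.length ≤ a.length)) :
    ∀ k i : Nat, k ≤ i → (L.getD i []).length ≤ (L.getD k []).length := by
  intro k i hki
  by_cases hi : i < L.length
  · have hk : k < L.length := by omega
    rw [List.getD_eq_getElem _ _ hi, List.getD_eq_getElem _ _ hk]
    rcases Nat.lt_or_ge k i with hlt | hge
    · exact (List.pairwise_iff_getElem.mp h) k i hk hi hlt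
    · have hke : k = i := by omega
      subst hke
      exact le_refl _
  · rw [List.getD_eq_default _ _ (by omega)]
    simp

lemma ports_agree (L : List (List String)) (n : Int) (hpre : Pre_get_min_error L n) :
    get_min_error L n = get_min_error_alt L n := by
  obtain ⟨hpw, -⟩ := hpre
  have hmono := pre_mono L hpw
  have h0 : pvImg L n 0 = [List.replicate (n + 1).toNat 0] := by
    unfold pvImg
    simp
  have hA : get_min_error L n = outerA L 0 (pvImg L n 0) 64 := by
    rw [h0]; rfl
  rw [hA, outerA_spec L n hmono L 0 64 (by rw [List.drop_zero]), altB_spec L n]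
  rfl

-- ===== VERDICT (by name: the statement is the Claim_ definition above) =====
theorem get_min_error_spec : Claim_equal_get_min_error := by
  intro input_list n _ hpre
  unfold Spec_get_min_error
  exact ports_agree input_list n hpre
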